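-- pv_equiv track=rewrite | github.com/konstantinlokotunin/HabitFlux | src/analysis.py | calculate_current_streak
-- ===== SOURCE A (Python) =====
-- def calculate_current_streak(values):
--     streak = 0
--     for v in list(reversed(values)):
--         if v == 1:
--             streak += 1
--         else:
--             break
--     return streak
-- ===== SOURCE B (Python) =====
-- def calculate_current_streak(values):
--     streak = 0
--     for v in values:
--         streak = streak + 1 if v == 1 else 0
--     return streak
-- ===== Notes on version B (the rewrite author's own statement) =====
-- stated objective: alternative
-- what changed: Replaces the reverse-copy-then-break-on-first-mismatch scan with a single forward pass that resets a counter on every non-1 value, so no reversed copy is built and no early exit is needed.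
import Mathlib
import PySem

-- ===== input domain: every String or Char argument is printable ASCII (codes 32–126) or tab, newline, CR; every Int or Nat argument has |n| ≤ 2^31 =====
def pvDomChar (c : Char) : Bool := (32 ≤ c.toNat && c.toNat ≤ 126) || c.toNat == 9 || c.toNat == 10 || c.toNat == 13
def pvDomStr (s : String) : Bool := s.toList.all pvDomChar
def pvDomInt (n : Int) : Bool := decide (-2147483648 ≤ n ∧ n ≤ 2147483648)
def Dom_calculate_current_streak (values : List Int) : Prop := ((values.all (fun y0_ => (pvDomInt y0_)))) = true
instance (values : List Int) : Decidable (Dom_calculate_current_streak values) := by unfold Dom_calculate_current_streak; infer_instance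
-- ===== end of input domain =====

-- B replaces A's reverse-copy-and-break scan with one forward pass that resets a counter on non-1 values (alternative decomposition, same result).


-- ===== PORT A =====
-- loop over reversed(values), incrementing streak while v == 1, breaking at the first mismatch
def pvAGo (streak : Int) : List Int → Int
  | [] => streak
  | v :: rest => if v = 1 then pvAGo (streak + 1) rest else streak

def calculate_current_streak (values : List Int) : Int :=
  pvAGo 0 values.reverse

-- ===== PORT B =====
-- single forward pass: counter incremented on 1, reset to 0 otherwise
def calculate_current_streak_alt (values : List Int) : Int :=
  values.foldl (fun streak v => if v = 1 then streak + 1 else 0) 0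

-- ===== PRECONDITION & SPEC =====
def Spec_calculate_current_streak (values : List Int) (out : Int) : Prop := out = calculate_current_streak_alt values
instance (values : List Int) (out : Int) : Decidable (Spec_calculate_current_streak values out) := by unfold Spec_calculate_current_streak; infer_instance

-- ===== CLAIM (what is proved, stated in full; the proofs are below) =====
def Claim_equal_calculate_current_streak : Prop := ∀ (values : List Int), Dom_calculate_current_streak values → Spec_calculate_current_streak values (calculate_current_streak values)

-- ===== LEMMAS AND PROOFS =====
theorem pvAGo_shift (l : List Int) (s : Int) : pvAGo s l = s + pvAGo 0 l := by
  induction l generalizing s with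
  | nil => simp [pvAGo]
  | cons v t ih =>
    simp only [pvAGo]
    split_ifs with h
    · rw [ih (s + 1), ih (0 + 1)]; ring
    · simp

theorem foldl_eq_aGo_reverse (l : List Int) :
    l.foldl (fun streak v => if v = 1 then streak + 1 else 0) 0 = pvAGo 0 l.reverse := by
  induction l using List.reverseRecOn with
  | nil => simp [pvAGo]
  | append_singleton t v ih =>
    rw [List.foldl_append, List.reverse_append]
    simp only [List.foldl, List.reverse_singleton, List.singleton_append, pvAGo]
    split_ifs with h
    · rw [pvAGo_shift, ih]; ring
    · rfl

-- ===== VERDICT (by name: the statement is the Claim_ definition above) =====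
theorem calculate_current_streak_spec : Claim_equal_calculate_current_streak := by
  intro values _
  unfold Spec_calculate_current_streak calculate_current_streak calculate_current_streak_alt
  exact (foldl_eq_aGo_reverse values).symm
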